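-- pv_equiv track=rewrite | github.com/Serms1999/AdventOfCode2022 | Day1/day1.py | get_three_top_elves
-- ===== SOURCE A (Python) =====
-- def get_three_top_elves(input_lines: list) -> int:
--     biggest_sums = []
--     current_sum = 0
--     for cal in input_lines:
--         if cal != '':
--             current_sum += int(cal)
--         else:
--             if len(biggest_sums) < 3:
--                 biggest_sums.append(current_sum)
--             elif current_sum > biggest_sums[0]:
--                 biggest_sums[0] = current_sum
--             biggest_sums.sort()
--             current_sum = 0
--
--     # Last element
--     if len(biggest_sums) < 3:
--         biggest_sums.append(current_sum)
--     elif current_sum > biggest_sums[0]: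
--         biggest_sums[0] = current_sum
--
--     return sum(biggest_sums)
-- ===== SOURCE B (Python) =====
-- def get_three_top_elves(input_lines: list) -> int:
--     sums = []
--     current_sum = 0
--     for cal in input_lines:
--         if cal != '':
--             current_sum += int(cal)
--         else:
--             sums.append(current_sum)
--             current_sum = 0
--     sums.append(current_sum)
--     return sum(sorted(sums)[-3:])
-- ===== Notes on version B (the rewrite author's own statement) =====
-- stated objective: simpler
-- what changed: B collects every elf group sum into a plain list and returns sum(sorted(sums)[-3:]), replacing A's in-loop maintenance of a sorted size-3 running top-3 buffer with replace-the-minimum logic.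
import Mathlib
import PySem

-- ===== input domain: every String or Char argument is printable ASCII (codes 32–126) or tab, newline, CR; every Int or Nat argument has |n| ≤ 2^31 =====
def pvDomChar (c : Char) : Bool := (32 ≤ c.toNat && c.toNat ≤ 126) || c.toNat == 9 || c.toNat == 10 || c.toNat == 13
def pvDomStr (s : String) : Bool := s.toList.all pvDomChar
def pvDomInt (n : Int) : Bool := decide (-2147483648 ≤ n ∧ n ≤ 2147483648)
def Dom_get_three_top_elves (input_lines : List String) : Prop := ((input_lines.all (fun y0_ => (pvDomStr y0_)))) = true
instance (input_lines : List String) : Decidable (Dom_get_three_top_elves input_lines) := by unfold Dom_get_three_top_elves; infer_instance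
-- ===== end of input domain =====

-- B collects every elf group sum into a list and returns sum(sorted(sums)[-3:]),
-- replacing A's in-loop sorted top-3 buffer; simpler, same behaviour on Pre_.


-- ===== PORT A =====
-- the `if len < 3 … elif current_sum > biggest_sums[0] …` update of biggest_sums
-- (`.getD 0` on bs[0] is unreachable: that branch runs only when bs has length 3)
def pvAPush (bs : List Int) (cur : Int) : List Int :=
  if bs.length < 3 then bs ++ [cur]
  else if cur > (PySem.List.pyGet? bs 0).getD 0 then PySem.List.pySetD bs 0 cur
  else bs

-- A's loop body over (biggest_sums, current_sum); int(cal) = PySem.Int.ofStr?,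
-- whose `.getD 0` is unreachable inside Pre_ (every non-empty line parses)
def pvAStep (st : List Int × Int) (cal : String) : List Int × Int :=
  if cal ≠ "" then (st.1, st.2 + (PySem.Int.ofStr? cal).getD 0)
  else (PySem.List.sorted (pvAPush st.1 st.2) (fun x => x) false, 0)

def get_three_top_elves (input_lines : List String) : Int :=
  let st := input_lines.foldl pvAStep ([], 0)
  (pvAPush st.1 st.2).sum

-- ===== PORT B =====
-- B's loop body over (sums, current_sum)
def pvBStep (st : List Int × Int) (cal : String) : List Int × Int :=
  if cal ≠ "" then (st.1, st.2 + (PySem.Int.ofStr? cal).getD 0)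
  else (st.1 ++ [st.2], 0)

def get_three_top_elves_alt (input_lines : List String) : Int :=
  let st := input_lines.foldl pvBStep ([], 0)
  let sums := st.1 ++ [st.2]
  (PySem.List.slice (PySem.List.sorted sums (fun x => x) false) (some (-3)) none).sum

-- ===== PRECONDITION & SPEC =====
-- Pre_ excludes exactly the inputs on which A raises ValueError: a non-empty line that int() rejects
def Pre_get_three_top_elves (input_lines : List String) : Prop :=
  ∀ s ∈ input_lines, s ≠ "" → (PySem.Int.ofStr? s).isSome = true
instance (input_lines : List String) : Decidable (Pre_get_three_top_elves input_lines) := by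
  unfold Pre_get_three_top_elves; infer_instance
def pvWitness_get_three_top_elves : List String := ["100", "200", "", "300", "", "50"]

def Spec_get_three_top_elves (input_lines : List String) (out : Int) : Prop := out = get_three_top_elves_alt input_lines
instance (input_lines : List String) (out : Int) : Decidable (Spec_get_three_top_elves input_lines out) := by unfold Spec_get_three_top_elves; infer_instance

-- ===== CLAIM (what is proved, stated in full; the proofs are below) =====
def Claim_equal_get_three_top_elves : Prop := ∀ (input_lines : List String), Dom_get_three_top_elves input_lines → Pre_get_three_top_elves input_lines → Spec_get_three_top_elves input_lines (get_three_top_elves input_lines)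

-- ===== LEMMAS AND PROOFS =====

-- abbreviations for the proof
def pvSrt (l : List Int) : List Int := PySem.List.sorted l (fun x => x) false
-- the sorted list of the (at most three) largest elements of l
def pvTop3 (l : List Int) : List Int := (pvSrt l).drop (l.length - 3)

theorem pvSrt_perm (l : List Int) : (pvSrt l).Perm l := PySem.List.sorted_perm l _ _

theorem pvSrt_pairwise (l : List Int) : (pvSrt l).Pairwise (· ≤ ·) :=
  PySem.List.sorted_pairwise l (fun x => x)

theorem pvSrt_length (l : List Int) : (pvSrt l).length = l.length :=
  PySem.List.length_sorted l _ _

-- the heart of the equivalence: A's push-then-sort step maps top3 S to top3 (S ++ [x])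
theorem pvTop3_step (S : List Int) (x : Int) :
    pvSrt (pvAPush (pvTop3 S) x) = pvTop3 (S ++ [x]) := by
  by_cases hn : S.length < 3
  · -- fewer than three groups so far: top3 S is all of sorted S
    have h0 : S.length - 3 = 0 := by omega
    have hT : pvTop3 S = pvSrt S := by simp [pvTop3, h0]
    have hlen : (pvSrt S).length < 3 := by rw [pvSrt_length]; exact hn
    have hpush : pvAPush (pvTop3 S) x = pvSrt S ++ [x] := by
      simp [pvAPush, hT, hlen]
    have h1 : (S ++ [x]).length - 3 = 0 := by simp; omega
    rw [hpush]
    have : pvSrt (pvSrt S ++ [x]) = pvSrt (S ++ [x]) :=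
      PySem.List.sorted_eq_sorted_of_perm _ _ _ (fun a b h => h)
        (List.Perm.append_right [x] (pvSrt_perm S))
    rw [this]
    simp only [pvTop3, h1, List.drop_zero]
  · -- at least three groups: sorted S = u ++ [a,b,c]
    set n := S.length with hnS
    have hslen : (pvSrt S).length = n := pvSrt_length S
    have hdlen : ((pvSrt S).drop (n - 3)).length = 3 := by
      rw [List.length_drop, hslen]; omega
    set d := (pvSrt S).drop (n - 3) with hd
    set u := (pvSrt S).take (n - 3) with hu
    have hulen : u.length = n - 3 := by
      rw [hu, List.length_take, hslen]; omega
    obtain ⟨a, b, c, habc⟩ : ∃ a b c, d = [a, b, c] := by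
      match d, hdlen with
      | [a, b, c], _ => exact ⟨a, b, c, rfl⟩
    have hs : pvSrt S = u ++ [a, b, c] := by
      rw [hu, ← habc, hd, List.take_append_drop]
    have hp := pvSrt_pairwise S
    rw [hs, List.pairwise_append] at hp
    obtain ⟨hpu, hpabc, hcross⟩ := hp
    obtain ⟨⟨hab, -⟩, hbc⟩ : (a ≤ b ∧ a ≤ c) ∧ b ≤ c := by simpa using hpabc
    have hua : ∀ y ∈ u, y ≤ a := fun y hy => hcross y hy a (by simp)
    have hT : pvTop3 S = [a, b, c] := by rw [pvTop3, ← hnS, ← hd, habc]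
    have hlen1 : (S ++ [x]).length - 3 = n - 2 := by
      simp only [List.length_append, List.length_cons, List.length_nil]; omega
    by_cases hx : x > a
    · -- the new group beats the smallest of the current top three
      have hpush : pvAPush (pvTop3 S) x = [x, b, c] := by
        rw [hT, pvAPush]
        simp [hx, PySem.List.pySetD, PySem.List.pySet?, PySem.List.pyIdx?]
      rw [hpush]
      have hkey : pvSrt (S ++ [x]) = (u ++ [a]) ++ pvSrt [x, b, c] := by
        apply PySem.List.sorted_id_eq_of_perm_of_pairwise
        · -- permutation
          refine ((List.Perm.append_left (u ++ [a]) (pvSrt_perm [x, b, c])).trans ?_)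
          have h1 : ((u ++ [a]) ++ [x, b, c]).Perm ((u ++ [a, b, c]) ++ [x]) := by
            simp only [List.append_assoc]
            exact List.Perm.append_left u
              (List.Perm.cons a (List.perm_append_comm (l₁ := [x]) (l₂ := [b, c])))
          refine h1.trans ?_
          exact List.Perm.append_right [x] (hs ▸ pvSrt_perm S)
        · -- sortedness
          rw [List.pairwise_append]
          refine ⟨?_, pvSrt_pairwise [x, b, c], ?_⟩
          · rw [List.pairwise_append]
            refine ⟨hpu, by simp, ?_⟩
            intro y hy z hz
            simp at hz; subst hz; exact hua y hy
          · intro y hy z hz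
            rw [pvSrt, PySem.List.mem_sorted] at hz
            have hya : y ≤ a := by
              rcases (List.mem_append.mp hy) with h | h
              · exact hua y h
              · simp at h; omega
            have hza : a ≤ z := by
              simp at hz
              rcases hz with h | h | h <;> omega
            omega
      rw [pvTop3, hlen1, hkey]
      have : n - 2 = (u ++ [a]).length := by simp [hulen]; omega
      rw [this, List.drop_left]
    · -- the new group does not displace anything
      rw [not_lt] at hx
      have hpush : pvAPush (pvTop3 S) x = [a, b, c] := by
        rw [hT, pvAPush]
        simp
        omega
      rw [hpush]
      have habc_sorted : pvSrt [a, b, c] = [a, b, c] :=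
        PySem.List.sorted_eq_self_of_pairwise _ _ (by simp; omega)
      have hkey : pvSrt (S ++ [x]) = pvSrt (u ++ [x]) ++ [a, b, c] := by
        apply PySem.List.sorted_id_eq_of_perm_of_pairwise
        · refine ((List.Perm.append_right [a, b, c] (pvSrt_perm (u ++ [x]))).trans ?_)
          have h1 : ((u ++ [x]) ++ [a, b, c]).Perm ((u ++ [a, b, c]) ++ [x]) := by
            simp only [List.append_assoc]
            exact List.Perm.append_left u
              (List.perm_append_comm (l₁ := [x]) (l₂ := [a, b, c]))
          refine h1.trans ?_
          exact List.Perm.append_right [x] (hs ▸ pvSrt_perm S)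
        · rw [List.pairwise_append]
          refine ⟨pvSrt_pairwise (u ++ [x]), by simp; omega, ?_⟩
          intro y hy z hz
          rw [pvSrt, PySem.List.mem_sorted] at hy
          have hya : y ≤ a := by
            rcases List.mem_append.mp hy with h | h
            · exact hua y h
            · simp at h; omega
          have hza : a ≤ z := by simp at hz; rcases hz with h | h | h <;> omega
          omega
      rw [habc_sorted, pvTop3, hlen1, hkey]
      have : n - 2 = (pvSrt (u ++ [x])).length := by
        rw [pvSrt_length, List.length_append, hulen]
        simp only [List.length_cons, List.length_nil]
        omega
      rw [this, List.drop_left]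

-- A's fold simulates B's fold through pvTop3
theorem pvFold_sim (lines : List String) (sums : List Int) (cur : Int) :
    lines.foldl pvAStep (pvTop3 sums, cur)
      = (pvTop3 (lines.foldl pvBStep (sums, cur)).1,
         (lines.foldl pvBStep (sums, cur)).2) := by
  induction lines generalizing sums cur with
  | nil => simp
  | cons cal rest ih =>
    by_cases hc : cal = ""
    · subst hc
      have hA : pvAStep (pvTop3 sums, cur) "" = (pvTop3 (sums ++ [cur]), 0) := by
        simp only [pvAStep, ne_eq, not_true_eq_false, if_false]
        exact congrArg (fun l => (l, (0 : Int))) (pvTop3_step sums cur)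
      have hB : pvBStep (sums, cur) "" = (sums ++ [cur], 0) := by
        simp only [pvBStep, ne_eq, not_true_eq_false, if_false]
      rw [List.foldl_cons, List.foldl_cons, hA, hB]
      exact ih (sums ++ [cur]) 0
    · have hA : pvAStep (pvTop3 sums, cur) cal
          = (pvTop3 sums, cur + (PySem.Int.ofStr? cal).getD 0) := by
        simp only [pvAStep, ne_eq, hc, not_false_eq_true, if_true]
      have hB : pvBStep (sums, cur) cal
          = (sums, cur + (PySem.Int.ofStr? cal).getD 0) := by
        simp only [pvBStep, ne_eq, hc, not_false_eq_true, if_true]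
      rw [List.foldl_cons, List.foldl_cons, hA, hB]
      exact ih sums _

-- sum is invariant under A's final (unsorted) push
theorem pvFinal_sum (S : List Int) (x : Int) :
    (pvAPush (pvTop3 S) x).sum = (pvTop3 (S ++ [x])).sum := by
  rw [← pvTop3_step S x]
  exact ((pvSrt_perm (pvAPush (pvTop3 S) x)).sum_eq).symm

-- ===== VERDICT (by name: the statement is the Claim_ definition above) =====
theorem get_three_top_elves_spec : Claim_equal_get_three_top_elves := by
  unfold Claim_equal_get_three_top_elves
  intro lines _ _
  unfold Spec_get_three_top_elves
  have hA : get_three_top_elves lines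
      = (pvAPush ((lines.foldl pvAStep ([], 0)).1) ((lines.foldl pvAStep ([], 0)).2)).sum := rfl
  have hB : get_three_top_elves_alt lines
      = (PySem.List.slice (PySem.List.sorted
          ((lines.foldl pvBStep (([] : List Int), (0 : Int))).1
            ++ [(lines.foldl pvBStep (([] : List Int), (0 : Int))).2]) (fun x => x) false)
          (some (-3)) none).sum := rfl
  rw [hA, hB]
  have hsim := pvFold_sim lines [] 0
  rw [show (pvTop3 [] : List Int) = [] from rfl] at hsim
  rw [hsim]
  rw [pvFinal_sum (lines.foldl pvBStep ([], 0)).1 (lines.foldl pvBStep ([], 0)).2]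
  rw [PySem.List.slice_from_neg_ofNat _ 3 (by omega)]
  unfold pvTop3 pvSrt
  rw [PySem.List.length_sorted]
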